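-- pv_equiv track=rewrite | github.com/JelleSakkers/Computational-Science | CA1/new.py | detect_cycle_and_length
-- ===== SOURCE A (Python) =====
-- def detect_cycle_and_length(values):
--     seen = {}
--     cycles = []
--
--     for index, value in enumerate(values):
--         if value in seen:
--             # Cycle detected
--             cycle_start = seen[value]
--             cycle_length = index - cycle_start
--             cycles.append((cycle_start, cycle_length))
--         else:
--             seen[value] = index
--
--     if cycles:
--         return True, cycles
--     else:
--         return False, []
-- ===== SOURCE B (Python) =====
-- def detect_cycle_and_length(values):
--     # Stage 1: group all occurrence indices by value.
--     positions = {}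
--     for index, value in enumerate(values):
--         positions.setdefault(value, []).append(index)
--
--     # Stage 2: per group, the first index is the cycle start; every later
--     # occurrence yields one record tagged with its occurrence index.
--     records = []
--     for idxs in positions.values():
--         start, *repeats = idxs
--         records.extend((i, start, i - start) for i in repeats)
--
--     # Stage 3: restore ascending occurrence order, then drop the tag.
--     records.sort(key=lambda r: r[0])
--     cycles = [(start, length) for _, start, length in records]
--     return (bool(cycles), cycles)
-- ===== Notes on version B (the rewrite author's own statement) =====
-- stated objective: alternative
-- what changed: Replaces A's single stateful detect-as-you-go loop by a staged group-emit-sort pipeline: one pass groups all occurrence indices per value, then each group emits (occurrence, start, gap) records, which are sorted by occurrence index to restore A's emission order.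
import Mathlib
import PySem

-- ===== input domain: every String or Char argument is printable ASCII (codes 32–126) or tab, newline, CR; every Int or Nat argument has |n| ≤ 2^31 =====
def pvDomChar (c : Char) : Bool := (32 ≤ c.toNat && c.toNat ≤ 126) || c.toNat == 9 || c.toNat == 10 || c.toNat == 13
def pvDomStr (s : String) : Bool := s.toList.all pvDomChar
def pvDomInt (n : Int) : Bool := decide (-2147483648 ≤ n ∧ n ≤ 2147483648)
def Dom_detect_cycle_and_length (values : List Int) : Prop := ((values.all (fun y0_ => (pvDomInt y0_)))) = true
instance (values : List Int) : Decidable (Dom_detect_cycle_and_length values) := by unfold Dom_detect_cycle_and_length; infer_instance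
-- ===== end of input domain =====

-- B replaces A's single stateful detect-as-you-go loop by a staged pipeline: group occurrence
-- indices per value, emit one tagged record per repeated occurrence, sort the records by
-- occurrence index; same return value (objective: alternative).

-- ===== PORT A =====
def detect_cycle_and_length (values : List Int) : Bool × (List (Int × Int)) :=
  let st := (PySem.List.enumerate values 0).foldl
    (fun (st : PySem.Dict Int Int × List (Int × Int)) iv =>
      if st.1.contains iv.2 then
        -- Cycle detected
        let cycle_start := (st.1.get? iv.2).getD 0
        let cycle_length := iv.1 - cycle_start
        (st.1, st.2 ++ [(cycle_start, cycle_length)])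
      else
        (st.1.insert iv.2 iv.1, st.2))
    (PySem.Dict.empty, [])
  if st.2 ≠ [] then (true, st.2) else (false, [])

-- ===== PORT B =====
def detect_cycle_and_length_alt (values : List Int) : Bool × (List (Int × Int)) :=
  -- Stage 1: positions.setdefault(value, []).append(index)  (d[k] = d.get(k, []) + [i])
  let positions := (PySem.List.enumerate values 0).foldl
    (fun (d : PySem.Dict Int (List Int)) iv => d.modify iv.2 [] (fun l => l ++ [iv.1]))
    PySem.Dict.empty
  -- Stage 2: 'start, *repeats = idxs' then extend; the [] branch is Python's (unreachable)
  -- unpacking error on an empty group — every stored group holds at least one index.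
  let records := positions.values.foldl
    (fun (acc : List (Int × Int × Int)) idxs =>
      match idxs with
      | [] => acc
      | start :: repeats => acc ++ repeats.map (fun i => (i, start, i - start)))
    []
  -- Stage 3: records.sort(key=lambda r: r[0]); then drop the tag.
  let recs := PySem.List.sorted records (fun r => r.1) false
  let cycles := recs.map (fun r => (r.2.1, r.2.2))
  (decide (cycles ≠ []), cycles)

-- ===== PRECONDITION & SPEC =====
def Spec_detect_cycle_and_length (values : List Int) (out : Bool × (List (Int × Int))) : Prop := out = detect_cycle_and_length_alt values
instance (values : List Int) (out : Bool × (List (Int × Int))) : Decidable (Spec_detect_cycle_and_length values out) := by unfold Spec_detect_cycle_and_length; infer_instance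

-- ===== CLAIM (what is proved, stated in full; the proofs are below) =====
def Claim_equal_detect_cycle_and_length : Prop := ∀ (values : List Int), Dom_detect_cycle_and_length values → Spec_detect_cycle_and_length values (detect_cycle_and_length values)

-- ===== LEMMAS AND PROOFS =====

-- the tagged records both programs are about, in occurrence order, recursing on the
-- unprocessed suffix with the processed prefix explicit
def pvCanon (p rest : List Int) : List (Int × Int × Int) :=
  match rest with
  | [] => []
  | x :: rest' =>
    (if x ∈ p then
       [((p.length : Int), (((PySem.List.index? p x).getD 0 : Nat) : Int),
         (p.length : Int) - (((PySem.List.index? p x).getD 0 : Nat) : Int))]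
     else []) ++ pvCanon (p ++ [x]) rest'

-- occurrence indices of v in p, counted from offset n (spec of B's 'positions' groups)
def pvIdxs (n : Int) (p : List Int) (v : Int) : List Int :=
  match p with
  | [] => []
  | y :: t => (if y == v then [n] else []) ++ pvIdxs (n + 1) t v

-- records emitted from one group
def pvG (idxs : List Int) : List (Int × Int × Int) :=
  match idxs with
  | [] => []
  | s :: t => t.map (fun i => (i, s, i - s))

lemma index?_append_singleton_of_mem {p : List Int} {x v : Int} (hx : x ∈ p) :
    PySem.List.index? (p ++ [x]) v = PySem.List.index? p v := by
  by_cases hv : v ∈ p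
  · exact PySem.List.index?_append_of_mem [x] hv
  · have hvx : v ∉ p ++ [x] := by
      simp only [List.mem_append, List.mem_singleton]
      rintro (h | rfl) <;> [exact hv h; exact hv hx]
    rw [(PySem.List.index?_eq_none_iff _ _).mpr hvx, (PySem.List.index?_eq_none_iff _ _).mpr hv]

-- A's loop invariant: the 'seen' dict holds the first index of each value of the processed prefix
lemma loopA (rest : List Int) : ∀ (p : List Int) (d : PySem.Dict Int Int) (acc : List (Int × Int)),
    (∀ v, d.get? v = (PySem.List.index? p v).map (fun n => (n : Int))) →
    ((PySem.List.enumerate rest (p.length : Int)).foldl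
      (fun (st : PySem.Dict Int Int × List (Int × Int)) iv =>
        if st.1.contains iv.2 then
          let cycle_start := (st.1.get? iv.2).getD 0
          let cycle_length := iv.1 - cycle_start
          (st.1, st.2 ++ [(cycle_start, cycle_length)])
        else
          (st.1.insert iv.2 iv.1, st.2))
      (d, acc)).2 = acc ++ (pvCanon p rest).map (fun r => (r.2.1, r.2.2)) := by
  induction rest with
  | nil => intro p d acc hd; simp [PySem.List.enumerate_nil, pvCanon]
  | cons x rest' ih =>
    intro p d acc hd
    rw [PySem.List.enumerate_cons, List.foldl_cons]
    have hcast : (p.length : Int) + 1 = ((p ++ [x]).length : Int) := by simp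
    by_cases hx : x ∈ p
    · obtain ⟨k, hk⟩ := Option.isSome_iff_exists.mp ((PySem.List.index?_isSome_iff _ _).mpr hx)
      have hcont : d.contains x = true := by
        rw [PySem.Dict.contains_eq_isSome_get?, hd x, hk]; rfl
      have hget : (d.get? x).getD 0 = (((PySem.List.index? p x).getD 0 : Nat) : Int) := by
        rw [hd x, hk]; rfl
      simp only [hcont, if_true, hget]
      rw [hcast, ih (p ++ [x]) d (acc ++ _) (by
        intro v; rw [hd v, index?_append_singleton_of_mem hx])]
      simp [pvCanon, hx, List.append_assoc]
    · have hcont : d.contains x = false := by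
        rw [PySem.Dict.contains_eq_isSome_get?, hd x,
          (PySem.List.index?_eq_none_iff _ _).mpr hx]; rfl
      simp only [hcont, Bool.false_eq_true, if_false]
      rw [hcast, ih (p ++ [x]) (d.insert x (p.length : Int)) acc (by
        intro v
        by_cases hv : v = x
        · subst hv
          rw [PySem.Dict.get?_insert_self, PySem.List.index?_append_singleton_self p v hx]
          rfl
        · rw [PySem.Dict.get?_insert_of_ne _ _ hv, hd v]
          by_cases hvp : v ∈ p
          · rw [PySem.List.index?_append_of_mem [x] hvp]
          · have hvx : v ∉ p ++ [x] := by
              simp only [List.mem_append, List.mem_singleton]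
              rintro (h | rfl) <;> [exact hvp h; exact hv rfl]
            rw [(PySem.List.index?_eq_none_iff _ _).mpr hvp,
              (PySem.List.index?_eq_none_iff _ _).mpr hvx])]
      simp [pvCanon, hx]

-- pvIdxs facts
lemma pvIdxs_nil_of_not_mem {p : List Int} {x : Int} (hx : x ∉ p) (n : Int) :
    pvIdxs n p x = [] := by
  induction p generalizing n with
  | nil => rfl
  | cons y t ih =>
    have hy : (y == x) = false := by
      simp only [beq_eq_false_iff_ne]; rintro rfl; exact hx (List.mem_cons_self)
    simpa [pvIdxs, hy] using ih (fun h => hx (List.mem_cons_of_mem _ h)) (n + 1)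

lemma pvIdxs_append_singleton (p : List Int) (x v : Int) (n : Int) :
    pvIdxs n (p ++ [x]) v = pvIdxs n p v ++ (if x == v then [n + p.length] else []) := by
  induction p generalizing n with
  | nil => simp [pvIdxs]
  | cons y t ih =>
    simp only [List.cons_append, pvIdxs, ih (n + 1), List.length_cons]
    by_cases hy : (y == v) = true <;> by_cases hx : (x == v) = true <;>
      simp [hy, hx, add_comm, add_assoc, add_left_comm]

lemma pvIdxs_first {p : List Int} {x : Int} (hx : x ∈ p) (n : Int) :
    ∃ t, pvIdxs n p x = (n + (((PySem.List.index? p x).getD 0 : Nat) : Int)) :: t := by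
  induction p generalizing n with
  | nil => cases hx
  | cons y t ih =>
    by_cases hy : y = x
    · subst hy
      refine ⟨pvIdxs (n + 1) t y, ?_⟩
      simp [pvIdxs, PySem.List.index?, List.idxOf?_cons]
    · have hx' : x ∈ t := by cases hx with | head => exact absurd rfl hy | tail _ h => exact h
      obtain ⟨tl, htl⟩ := ih hx' (n + 1)
      refine ⟨tl, ?_⟩
      have hyb : (y == x) = false := by simp [hy]
      have : PySem.List.index? (y :: t) x = (PySem.List.index? t x).map (· + 1) := by
        simp [PySem.List.index?, List.idxOf?_cons, hyb]
      obtain ⟨k, hk⟩ := Option.isSome_iff_exists.mp ((PySem.List.index?_isSome_iff _ _).mpr hx')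
      simp only [pvIdxs, hyb, List.nil_append, htl, this, hk, Option.map_some, Option.getD_some]
      push_cast
      rw [List.nil_append]
      congr 1
      ring

-- Set.ofList grows by at most one element at the right
lemma ofList_append_singleton (p : List Int) (x : Int) :
    PySem.Set.ofList (p ++ [x]) =
      if x ∈ p then PySem.Set.ofList p else PySem.Set.ofList p ++ [x] := by
  have h : PySem.Set.ofList (p ++ [x]) = PySem.Set.add (PySem.Set.ofList p) x := by
    simp [PySem.Set.ofList, List.foldl_append]
  rw [h, PySem.Set.add]
  by_cases hx : x ∈ p
  · have : (PySem.Set.ofList p).contains x = true := by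
      simp [List.contains_iff_mem, PySem.Set.mem_ofList, hx]
    simp [this, hx]
  · have : (PySem.Set.ofList p).contains x = false := by
      simp [List.contains_iff_mem, PySem.Set.mem_ofList, hx]
    simp [this, hx]

-- B's grouping dict: its items are exactly (value, occurrence indices) per distinct value
lemma dictItems (rest : List Int) : ∀ (p : List Int) (d : PySem.Dict Int (List Int)),
    d.items = (PySem.Set.ofList p).map (fun v => (v, pvIdxs 0 p v)) →
    ((PySem.List.enumerate rest (p.length : Int)).foldl
      (fun (d : PySem.Dict Int (List Int)) iv => d.modify iv.2 [] (fun l => l ++ [iv.1])) d).items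
    = (PySem.Set.ofList (p ++ rest)).map (fun v => (v, pvIdxs 0 (p ++ rest) v)) := by
  induction rest with
  | nil => intro p d hd; simpa [PySem.List.enumerate_nil] using hd
  | cons x rest' ih =>
    intro p d hd
    rw [PySem.List.enumerate_cons, List.foldl_cons]
    have hcast : (p.length : Int) + 1 = ((p ++ [x]).length : Int) := by simp
    have hkeys : d.keys = PySem.Set.ofList p := by
      simp [PySem.Dict.keys, hd, List.map_map, Function.comp_def]
    have hnodup : d.keys.Nodup := by rw [hkeys]; exact PySem.Set.nodup_ofList p
    have hassoc : p ++ x :: rest' = (p ++ [x]) ++ rest' := by simp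
    have hmod : d.modify x [] (fun l => l ++ [(p.length : Int)])
        = d.insert x (d.getD x [] ++ [(p.length : Int)]) := rfl
    by_cases hx : x ∈ p
    · have hcont : d.contains x = true := by
        rw [PySem.Dict.contains_eq_decide_mem_keys, hkeys]
        simp [PySem.Set.mem_ofList, hx]
      have hmem : (x, pvIdxs 0 p x) ∈ d.items := by
        rw [hd]
        exact List.mem_map.mpr ⟨x, (PySem.Set.mem_ofList p x).mpr hx, rfl⟩
      have hget : d.getD x [] = pvIdxs 0 p x :=
        PySem.Dict.getD_of_mem_items d hmem hnodup []
      have hitems : (d.modify x [] (fun l => l ++ [(p.length : Int)])).items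
          = (PySem.Set.ofList (p ++ [x])).map (fun v => (v, pvIdxs 0 (p ++ [x]) v)) := by
        rw [hmod, PySem.Dict.items_insert_of_contains d _ hcont, hget, hd,
          ofList_append_singleton, if_pos hx, List.map_map]
        refine List.map_congr_left ?_
        intro v hv
        by_cases hvx : v = x
        · subst hvx
          simp [pvIdxs_append_singleton, Function.comp_def]
        · simp only [pvIdxs_append_singleton]
          simp [Ne.symm hvx, hvx]
      rw [hcast, hassoc]
      exact ih (p ++ [x]) _ hitems
    · have hcont : d.contains x = false := by
        rw [PySem.Dict.contains_eq_decide_mem_keys, hkeys]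
        simp [PySem.Set.mem_ofList, hx]
      have hget : d.getD x [] = [] := PySem.Dict.getD_of_not_contains d [] hcont
      have hitems : (d.modify x [] (fun l => l ++ [(p.length : Int)])).items
          = (PySem.Set.ofList (p ++ [x])).map (fun v => (v, pvIdxs 0 (p ++ [x]) v)) := by
        rw [hmod, PySem.Dict.items_insert_of_not_contains d _ hcont, hget, hd,
          ofList_append_singleton, if_neg hx, List.map_append]
        congr 1
        · refine List.map_congr_left ?_
          intro v hv
          have hvx : v ≠ x := fun h => hx (h ▸ (PySem.Set.mem_ofList p v).mp hv)
          simp [pvIdxs_append_singleton, Ne.symm hvx]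
        · simp [pvIdxs_append_singleton, pvIdxs_nil_of_not_mem hx]
      rw [hcast, hassoc]
      exact ih (p ++ [x]) _ hitems

-- the flatMap of the groups' records is a permutation of the canonical record list
lemma pvCanon_append (r : List Int) : ∀ (q : List Int) (x : Int),
    pvCanon q (r ++ [x]) = pvCanon q r ++
      (if x ∈ q ++ r then
        [(((q ++ r).length : Int), (((PySem.List.index? (q ++ r) x).getD 0 : Nat) : Int),
          ((q ++ r).length : Int) - (((PySem.List.index? (q ++ r) x).getD 0 : Nat) : Int))]
       else []) := by
  induction r with
  | nil => intro q x; simp [pvCanon]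
  | cons y r' ih =>
    intro q x
    simp only [List.cons_append, pvCanon, ih (q ++ [y]) x]
    rw [List.append_cons q y r']
    simp [List.append_assoc]

lemma permRecs (values : List Int) :
    (pvCanon [] values).Perm
      ((PySem.Set.ofList values).flatMap (fun v => pvG (pvIdxs 0 values v))) := by
  induction values using List.reverseRecOn with
  | nil => simp [pvCanon, PySem.Set.ofList, PySem.Set.empty]
  | append_singleton p x ih =>
    rw [pvCanon_append, ofList_append_singleton]
    by_cases hx : x ∈ p
    · simp only [List.nil_append, if_pos hx]
      obtain ⟨l1, l2, hS⟩ := List.append_of_mem ((PySem.Set.mem_ofList p x).mpr hx)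
      have hnd := PySem.Set.nodup_ofList p
      rw [hS] at hnd ih ⊢
      have hx12 : x ∉ l1 ++ l2 := (List.nodup_cons.mp (List.nodup_middle.mp hnd)).1
      have hx1 : x ∉ l1 := fun h => hx12 (List.mem_append.mpr (Or.inl h))
      have hx2 : x ∉ l2 := fun h => hx12 (List.mem_append.mpr (Or.inr h))
      obtain ⟨t, ht⟩ := pvIdxs_first hx 0
      have hfx : pvG (pvIdxs 0 (p ++ [x]) x)
          = pvG (pvIdxs 0 p x) ++
            [((p.length : Int), (((PySem.List.index? p x).getD 0 : Nat) : Int),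
              (p.length : Int) - (((PySem.List.index? p x).getD 0 : Nat) : Int))] := by
        rw [pvIdxs_append_singleton]
        simp only [BEq.rfl, if_pos, ht]
        simp [pvG]
      simp only [List.flatMap_append, List.flatMap_cons] at ih ⊢
      have h1 : l1.flatMap (fun v => pvG (pvIdxs 0 (p ++ [x]) v))
          = l1.flatMap (fun v => pvG (pvIdxs 0 p v)) := by
        refine List.flatMap_congr ?_
        intro v hv
        have hvx : (x == v) = false := by
          simp only [beq_eq_false_iff_ne]; rintro rfl; exact hx1 hv
        rw [pvIdxs_append_singleton, hvx]
        simp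
      have h2 : l2.flatMap (fun v => pvG (pvIdxs 0 (p ++ [x]) v))
          = l2.flatMap (fun v => pvG (pvIdxs 0 p v)) := by
        refine List.flatMap_congr ?_
        intro v hv
        have hvx : (x == v) = false := by
          simp only [beq_eq_false_iff_ne]; rintro rfl; exact hx2 hv
        rw [pvIdxs_append_singleton, hvx]
        simp
      rw [h1, h2, hfx]
      rw [List.perm_iff_count] at ih ⊢
      intro a
      have := ih a
      simp only [List.count_append] at this ⊢
      omega
    · simp only [List.nil_append, if_neg hx, List.append_nil]
      rw [List.flatMap_append, List.flatMap_cons, List.flatMap_nil]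
      have hfx : pvG (pvIdxs 0 (p ++ [x]) x) = [] := by
        rw [pvIdxs_append_singleton, pvIdxs_nil_of_not_mem hx]
        simp [pvG]
      have h1 : (PySem.Set.ofList p).flatMap (fun v => pvG (pvIdxs 0 (p ++ [x]) v))
          = (PySem.Set.ofList p).flatMap (fun v => pvG (pvIdxs 0 p v)) := by
        refine List.flatMap_congr ?_
        intro v hv
        have hvx : (x == v) = false := by
          simp only [beq_eq_false_iff_ne]
          rintro rfl
          exact hx ((PySem.Set.mem_ofList p x).mp hv)
        rw [pvIdxs_append_singleton, hvx]
        simp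
      rw [hfx, h1]
      simpa using ih

-- the canonical records are strictly increasing in the occurrence index
lemma pvCanon_pairwise (rest : List Int) : ∀ (p : List Int),
    (∀ r ∈ pvCanon p rest, (p.length : Int) ≤ r.1) ∧
      (pvCanon p rest).Pairwise (fun a b => a.1 < b.1) := by
  induction rest with
  | nil => intro p; exact ⟨by simp [pvCanon], by simp [pvCanon]⟩
  | cons x rest' ih =>
    intro p
    obtain ⟨hb, hp⟩ := ih (p ++ [x])
    have hb' : ∀ r ∈ pvCanon (p ++ [x]) rest', (p.length : Int) + 1 ≤ r.1 := by
      intro r hr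
      have := hb r hr
      simpa using this
    by_cases hx : x ∈ p
    · constructor
      · intro r hr
        simp only [pvCanon, if_pos hx, List.cons_append, List.nil_append, List.mem_cons] at hr
        rcases hr with rfl | hr
        · simp
        · exact le_trans (by omega) (hb' r hr)
      · simp only [pvCanon, if_pos hx, List.cons_append, List.nil_append]
        exact List.pairwise_cons.mpr ⟨fun r hr => lt_of_lt_of_le (by omega) (hb' r hr), hp⟩
    · constructor
      · intro r hr
        simp only [pvCanon, if_neg hx, List.nil_append] at hr
        exact le_trans (by omega) (hb' r hr)
      · simpa [pvCanon, hx] using hp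

-- ===== VERDICT (by name: the statement is the Claim_ definition above) =====
theorem detect_cycle_and_length_spec : Claim_equal_detect_cycle_and_length := by
  intro values _
  show detect_cycle_and_length values = detect_cycle_and_length_alt values
  unfold detect_cycle_and_length detect_cycle_and_length_alt
  have hA : ((PySem.List.enumerate values 0).foldl
      (fun (st : PySem.Dict Int Int × List (Int × Int)) iv =>
        if st.1.contains iv.2 then
          let cycle_start := (st.1.get? iv.2).getD 0
          let cycle_length := iv.1 - cycle_start
          (st.1, st.2 ++ [(cycle_start, cycle_length)])
        else
          (st.1.insert iv.2 iv.1, st.2))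
      (PySem.Dict.empty, [])).2 = (pvCanon [] values).map (fun r => (r.2.1, r.2.2)) := by
    have := loopA values [] PySem.Dict.empty [] (by intro v; simp [PySem.Dict.get?_empty])
    simpa using this
  have hdict := dictItems values [] PySem.Dict.empty (by simp [PySem.Dict.empty])
  have hvals : ((PySem.List.enumerate values 0).foldl
      (fun (d : PySem.Dict Int (List Int)) iv => d.modify iv.2 [] (fun l => l ++ [iv.1]))
      PySem.Dict.empty).values
      = (PySem.Set.ofList values).map (fun v => pvIdxs 0 values v) := by
    simp only [PySem.Dict.values]
    have h0 : ((List.length ([] : List Int) : Int)) = 0 := by simp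
    rw [← h0] at *
    rw [hdict]
    simp [List.map_map, Function.comp_def]
  have hfold : ∀ (vs : List (List Int)),
      vs.foldl (fun (acc : List (Int × Int × Int)) idxs =>
        match idxs with
        | [] => acc
        | start :: repeats => acc ++ repeats.map (fun i => (i, start, i - start))) []
      = vs.flatMap pvG := by
    intro vs
    have hfun : (fun (acc : List (Int × Int × Int)) (idxs : List Int) =>
        match idxs with
        | [] => acc
        | start :: repeats => acc ++ repeats.map (fun i => (i, start, i - start)))
        = fun acc idxs => acc ++ pvG idxs := by
      funext acc idxs
      cases idxs <;> simp [pvG]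
    rw [hfun, PySem.List.foldl_append_eq_flatMap]
    simp
  have hflat : ((PySem.Set.ofList values).map (fun v => pvIdxs 0 values v)).flatMap pvG
      = (PySem.Set.ofList values).flatMap (fun v => pvG (pvIdxs 0 values v)) := by
    simp [List.flatMap_map]
  have hsorted : PySem.List.sorted
      ((PySem.Set.ofList values).flatMap (fun v => pvG (pvIdxs 0 values v)))
      (fun r => r.1) false = pvCanon [] values :=
    PySem.List.sorted_eq_of_perm_of_pairwise_lt _ _ _ (permRecs values)
      (by simpa using (pvCanon_pairwise values []).2)
  simp only []
  rw [hA, hvals, hfold, hflat, hsorted]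
  cases h : (pvCanon [] values).map (fun r => (r.2.1, r.2.2)) with
  | nil => simp
  | cons a l => simp
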